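-- pv_equiv track=rewrite | github.com/mrquintin/coherence-engine | server/fund/services/alert_routing.py | _pd_severity_from_envelope
-- ===== SOURCE A (Python) =====
-- from typing import Callable, Dict, List, Literal, Optional, Tuple
--
-- def _pd_severity_from_envelope(severities: Dict[str, str]) -> str:
--     order = ("critical", "error", "warning", "info")
--     present = [severities.get(t, "warning") for t in severities] if severities else ["warning"]
--     low = [str(s).lower() for s in present]
--     for o in order:
--         if o in low:
--             return o
--     return "warning"
-- ===== SOURCE B (Python) =====
-- def _pd_severity_from_envelope(severities):
--     rank = {"critical": 0, "error": 1, "warning": 2, "info": 3}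
--     names = ("critical", "error", "warning", "info")
--     best = None
--     for v in severities.values():
--         r = rank.get(str(v).lower())
--         if r is not None and (best is None or r < best):
--             best = r
--     return "warning" if best is None else names[best]
-- ===== Notes on version B (the rewrite author's own statement) =====
-- stated objective: idiomatic
-- what changed: Replaces A's build-three-lists-then-four-sequential-membership-scans with a single pass over the dict's values maintaining a running minimum over a rank table, then indexing the priority name.
import Mathlib
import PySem

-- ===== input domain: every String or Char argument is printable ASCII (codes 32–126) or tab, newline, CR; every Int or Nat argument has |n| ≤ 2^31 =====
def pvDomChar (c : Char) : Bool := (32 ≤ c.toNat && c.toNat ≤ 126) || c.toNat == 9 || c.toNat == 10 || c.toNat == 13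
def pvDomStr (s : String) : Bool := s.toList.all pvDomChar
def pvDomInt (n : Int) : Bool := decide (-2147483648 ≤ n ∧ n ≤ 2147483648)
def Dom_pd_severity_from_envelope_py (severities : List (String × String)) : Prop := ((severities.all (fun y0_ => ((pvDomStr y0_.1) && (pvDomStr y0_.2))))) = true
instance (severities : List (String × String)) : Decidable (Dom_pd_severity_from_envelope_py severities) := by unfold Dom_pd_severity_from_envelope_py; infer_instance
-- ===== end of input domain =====

-- B replaces A's three intermediate lists and four sequential membership scans by one pass over the
-- dict's values keeping a running minimum over a rank table (idiomatic; same asymptotic cost).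


-- ===== PORT A =====
-- 'for o in order: if o in low: return o' as structural recursion over the order tuple
def pvFirstIn (order : List String) (low : List String) : String :=
  match order with
  | [] => "warning"
  | o :: rest => if low.contains o then o else pvFirstIn rest low

def pd_severity_from_envelope_py (severities : List (String × String)) : String :=
  let d := PySem.Dict.ofList severities
  -- 'if severities' (dict truthiness): the dict built from the list is empty iff the list is
  let present := if severities.isEmpty then ["warning"]
                 else d.keys.map (fun t => d.getD t "warning")
  let low := present.map (fun s => PySem.Str.lower s)   -- str(s) on a str is s itself
  pvFirstIn ["critical", "error", "warning", "info"] low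

-- ===== PORT B =====
def pvRankTable : PySem.Dict String Int :=
  PySem.Dict.ofList [("critical", 0), ("error", 1), ("warning", 2), ("info", 3)]

def pvNames : List String := ["critical", "error", "warning", "info"]

def pvStep (best : Option Int) (v : String) : Option Int :=
  match pvRankTable.get? (PySem.Str.lower v) with
  | none => best
  | some r => if (match best with | none => true | some b => r < b) then some r else best

def pd_severity_from_envelope_py_alt (severities : List (String × String)) : String :=
  let best := (PySem.Dict.ofList severities).values.foldl pvStep none
  match best with
  | none => "warning"
  | some r =>      -- names[best]; the 'none' branch is an unreachable totality guard
    match PySem.List.pyGet? pvNames r with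
    | some s => s
    | none => "warning"

-- ===== PRECONDITION & SPEC =====
def Spec_pd_severity_from_envelope_py (severities : List (String × String)) (out : String) : Prop := out = pd_severity_from_envelope_py_alt severities
instance (severities : List (String × String)) (out : String) : Decidable (Spec_pd_severity_from_envelope_py severities out) := by unfold Spec_pd_severity_from_envelope_py; infer_instance

-- ===== CLAIM (what is proved, stated in full; the proofs are below) =====
def Claim_equal_pd_severity_from_envelope_py : Prop := ∀ (severities : List (String × String)), Dom_pd_severity_from_envelope_py severities → Spec_pd_severity_from_envelope_py severities (pd_severity_from_envelope_py severities)

-- ===== LEMMAS AND PROOFS =====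

-- min on Option Int with none as identity
def pvOptMin (a b : Option Int) : Option Int :=
  match a, b with
  | none, b => b
  | some a, none => some a
  | some a, some b => some (min a b)

lemma pvRankTable_eq_mk :
    pvRankTable = PySem.Dict.mk [("critical", 0), ("error", 1), ("warning", 2), ("info", 3)] := by
  decide

def pvMin (low : List String) : Option Int :=
  match low with
  | [] => none
  | v :: t => pvOptMin (pvRankTable.get? v) (pvMin t)

lemma pvOptMin_assoc (a b c : Option Int) :
    pvOptMin (pvOptMin a b) c = pvOptMin a (pvOptMin b c) := by
  cases a <;> cases b <;> cases c <;> simp [pvOptMin, min_assoc]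

lemma pvStep_eq (acc : Option Int) (v : String) :
    pvStep acc v = pvOptMin acc (pvRankTable.get? (PySem.Str.lower v)) := by
  unfold pvStep
  cases h : pvRankTable.get? (PySem.Str.lower v) <;> cases acc <;>
    (simp [pvOptMin, Int.min_def]; try (split_ifs <;> simp <;> omega))

lemma foldl_pvStep (low : List String) : ∀ acc : Option Int,
    low.foldl pvStep acc = pvOptMin acc (pvMin (low.map PySem.Str.lower)) := by
  induction low with
  | nil => intro acc; cases acc <;> simp [pvMin, pvOptMin]
  | cons v t ih =>
    intro acc
    simp only [List.foldl_cons, List.map_cons, pvMin, ih, pvStep_eq, pvOptMin_assoc]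

lemma pvMin_char (low : List String) :
    pvMin low =
      if low.contains "critical" then some 0
      else if low.contains "error" then some 1
      else if low.contains "warning" then some 2
      else if low.contains "info" then some 3
      else none := by
  induction low with
  | nil => rfl
  | cons v t ih =>
    simp only [pvMin, ih, List.contains_cons]
    by_cases h1 : v = "critical" <;> by_cases h2 : v = "error" <;>
      by_cases h3 : v = "warning" <;> by_cases h4 : v = "info" <;>
      simp_all <;>
      [skip; skip; skip; skip;
       (have hnone : pvRankTable.get? v = none := by
          rw [pvRankTable_eq_mk]
          simp [PySem.Dict.get?,
            Ne.symm h1, Ne.symm h2, Ne.symm h3, Ne.symm h4])] <;>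
      split_ifs <;> simp_all [pvRankTable, pvOptMin] <;> decide
  
lemma core (low : List String) :
    pvFirstIn ["critical", "error", "warning", "info"] low =
      (match pvOptMin none (pvMin low) with
       | none => "warning"
       | some r =>
         match PySem.List.pyGet? pvNames r with
         | some s => s
         | none => "warning") := by
  rw [pvMin_char]
  simp only [pvFirstIn]
  split_ifs <;> rfl

-- ===== VERDICT (by name: the statement is the Claim_ definition above) =====
theorem pd_severity_from_envelope_py_spec : Claim_equal_pd_severity_from_envelope_py := by
  intro severities _
  unfold Spec_pd_severity_from_envelope_py pd_severity_from_envelope_py pd_severity_from_envelope_py_alt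
  rw [foldl_pvStep]
  cases hs : severities with
  | nil => decide
  | cons x l =>
    simp only [List.isEmpty_cons]
    rw [PySem.Dict.values_eq_map_keys (PySem.Dict.ofList (x :: l))
        (PySem.Dict.nodup_keys_ofList _) "warning"] at *
    exact (core _).symm ▸ rfl
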